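-- pv_equiv track=rewrite | github.com/KimChengSHEANG/MedCWI | src/utils.py | remove_prefix_punctuation
-- ===== SOURCE A (Python) =====
-- from string import punctuation
-- from string import punctuation
--
-- def remove_prefix_punctuation(s):
--     new_s = ""
--     # remove punctuation as prefix
--     start = True
--     for c in s:
--         if start and c in punctuation:
--             pass # skip the punctuation
--         else:
--             start = False
--             new_s += c
--     return new_s
-- ===== SOURCE B (Python) =====
-- from string import punctuation
--
-- def remove_prefix_punctuation(s):
--     i = next((i for i, c in enumerate(s) if c not in punctuation), len(s))
--     return s[i:]
-- ===== Notes on version B (the rewrite author's own statement) =====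
-- stated objective: faster
-- what changed: Replaces the stateful flag-plus-accumulation loop (start flag, new_s += c, quadratic string concatenation) by computing the cut index of the first non-punctuation character and returning the single slice s[i:].
import Mathlib
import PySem

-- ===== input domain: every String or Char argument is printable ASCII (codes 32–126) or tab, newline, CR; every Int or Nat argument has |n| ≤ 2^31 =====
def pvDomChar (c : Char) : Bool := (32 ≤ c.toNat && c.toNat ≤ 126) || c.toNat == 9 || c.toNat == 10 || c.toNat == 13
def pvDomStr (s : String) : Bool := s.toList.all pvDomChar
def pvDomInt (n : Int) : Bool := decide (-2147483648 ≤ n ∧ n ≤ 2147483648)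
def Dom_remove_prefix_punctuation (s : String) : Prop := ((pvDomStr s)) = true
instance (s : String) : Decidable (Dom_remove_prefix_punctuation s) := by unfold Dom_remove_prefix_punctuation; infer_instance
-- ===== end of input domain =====

-- B replaces A's flag-plus-accumulation loop by computing the cut index and taking one slice (simpler decomposition).

-- string.punctuation
def pvPunct : List Char := "!\"#$%&'()*+,-./:;<=>?@[\\]^_`{|}~".toList

-- ===== PORT A =====
-- A's for-loop: state is (start, new_s); skip c while start and c is punctuation, else clear start and append c.
def pvLoopA : List Char → Bool → List Char → List Char
  | [], _, acc => acc
  | c :: rest, start, acc =>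
      if start && pvPunct.contains c then pvLoopA rest start acc
      else pvLoopA rest false (acc ++ [c])

def remove_prefix_punctuation (s : String) : String :=
  String.ofList (pvLoopA s.toList true [])

-- ===== PORT B =====
-- index of the first character not in punctuation, defaulting to the length
def pvCut : List Char → Nat
  | [] => 0
  | c :: rest => if pvPunct.contains c then pvCut rest + 1 else 0

def remove_prefix_punctuation_alt (s : String) : String :=
  String.ofList (s.toList.drop (pvCut s.toList))

-- ===== PRECONDITION & SPEC =====
def Spec_remove_prefix_punctuation (s : String) (out : String) : Prop := out = remove_prefix_punctuation_alt s
instance (s : String) (out : String) : Decidable (Spec_remove_prefix_punctuation s out) := by unfold Spec_remove_prefix_punctuation; infer_instance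

-- ===== CLAIM (what is proved, stated in full; the proofs are below) =====
def Claim_equal_remove_prefix_punctuation : Prop := ∀ (s : String), Dom_remove_prefix_punctuation s → Spec_remove_prefix_punctuation s (remove_prefix_punctuation s)

-- ===== LEMMAS AND PROOFS =====
theorem pvLoopA_false (l acc : List Char) : pvLoopA l false acc = acc ++ l := by
  induction l generalizing acc with
  | nil => simp [pvLoopA]
  | cons c rest ih => simp [pvLoopA, ih]

theorem pvLoopA_true (l : List Char) (acc : List Char) :
    pvLoopA l true acc = acc ++ l.drop (pvCut l) := by
  induction l generalizing acc with
  | nil => simp [pvLoopA, pvCut]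
  | cons c rest ih =>
      by_cases h : c ∈ pvPunct
      · simp [pvLoopA, pvCut, h, ih]
      · simp [pvLoopA, pvCut, h, pvLoopA_false]

-- ===== VERDICT (by name: the statement is the Claim_ definition above) =====
theorem remove_prefix_punctuation_spec : Claim_equal_remove_prefix_punctuation := by
  intro s _
  unfold Spec_remove_prefix_punctuation remove_prefix_punctuation remove_prefix_punctuation_alt
  rw [pvLoopA_true]
  simp
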